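-- pv_equiv track=rewrite | github.com/maxwshen/piu-analysis | src/_graph_edit.py | get_multi_chains
-- ===== SOURCE A (Python) =====
-- def get_multi_chains(line_nodes, edges_out):
--   multi_nodes = [n for n in line_nodes if 'multi' in n]
--   chains = []
--   import copy
--   qu = copy.copy(multi_nodes)
--   while qu:
--     node = qu.pop(0)
--     current_chain = [node]
--     inner_qu = [n for n in edges_out[node] if 'multi' in n]
--     assert len(inner_qu) < 2, 'Error: Assumption that each multi has at most one neighboring multi is broken'
--     while inner_qu:
--       curr = inner_qu.pop(0)
--       current_chain.append(curr)
--       inner_qu += [n for n in edges_out[curr] if 'multi' in n]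
--       assert len(inner_qu) < 2, 'Error: Assumption that each multi has at most one neighboring multi is broken'
--     chains.append(current_chain)
--     for node in current_chain:
--       if node in qu:
--         qu.remove(node)
--   return chains
-- ===== SOURCE B (Python) =====
-- def get_multi_chains(line_nodes, edges_out):
--   # One pass over line_nodes with a skip counter instead of a quadratic queue with list.remove scans.
--   skip = {}
--   chains = []
--   for n in line_nodes:
--     if 'multi' not in n:
--       continue
--     c = skip.get(n, 0)
--     if c > 0:
--       skip[n] = c - 1
--       continue
--     chain = [n]
--     cur = n
--     while True:
--       ms = [m for m in edges_out[cur] if 'multi' in m]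
--       assert len(ms) < 2, 'Error: Assumption that each multi has at most one neighboring multi is broken'
--       if not ms:
--         break
--       cur = ms[0]
--       chain.append(cur)
--     chains.append(chain)
--     for m in chain:
--       skip[m] = skip.get(m, 0) + 1
--   return chains
-- ===== Notes on version B (the rewrite author's own statement) =====
-- stated objective: faster
-- what changed: Replaces A's worklist queue (copy of the multi nodes with repeated 'in qu' membership scans and list.remove passes after every chain) by a single pass over line_nodes that follows each chain once and skips later occurrences via a dict-based skip counter.
import Mathlib
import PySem

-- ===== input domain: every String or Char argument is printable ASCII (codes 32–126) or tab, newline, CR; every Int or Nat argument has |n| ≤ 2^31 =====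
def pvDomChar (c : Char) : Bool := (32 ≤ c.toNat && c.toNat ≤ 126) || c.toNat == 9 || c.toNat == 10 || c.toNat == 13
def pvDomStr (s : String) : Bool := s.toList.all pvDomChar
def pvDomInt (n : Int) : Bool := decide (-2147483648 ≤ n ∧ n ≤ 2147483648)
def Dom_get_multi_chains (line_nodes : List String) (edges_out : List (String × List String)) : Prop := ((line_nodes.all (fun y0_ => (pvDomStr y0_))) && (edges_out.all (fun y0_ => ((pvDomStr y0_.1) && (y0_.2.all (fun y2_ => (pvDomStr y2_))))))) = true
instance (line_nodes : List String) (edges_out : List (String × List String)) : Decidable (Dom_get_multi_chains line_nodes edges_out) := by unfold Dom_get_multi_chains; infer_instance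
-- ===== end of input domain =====

-- B replaces A's quadratic queue (list.remove / membership scans) by one pass over line_nodes
-- with a skip counter; equivalence of the RETURN value is proved under Pre_ below.

-- ===== PORT A =====
-- 'multi' in n
def pvIsMulti (n : String) : Bool := PySem.Str.isIn "multi" n

-- inner 'while inner_qu' loop of A, fueled (Pre_ guarantees the fuel is never exhausted;
-- the assert never fires inside Pre_, so it is not modelled; edges_out[curr] is Dict.getD,
-- exact inside Pre_ where every consulted node is a key)
def pvInnerA (edges : List (String × List String)) :
    Nat → List String → List String → List String
  | _, chain, [] => chain
  | 0, chain, _ :: _ => chain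
  | f + 1, chain, curr :: rest =>
      pvInnerA edges f (chain ++ [curr])
        (rest ++ (PySem.Dict.getD (PySem.Dict.mk edges) curr []).filter pvIsMulti)

-- 'if node in qu: qu.remove(node)'
def pvRemoveIf (qu : List String) (node : String) : List String :=
  if qu.contains node then (PySem.List.remove? qu node).getD qu else qu

-- outer 'while qu' loop of A, fueled by the initial queue length (each step pops one element)
def pvOuterA (edges : List (String × List String)) :
    Nat → List String → List (List String) → List (List String)
  | _, [], chains => chains
  | 0, _ :: _, chains => chains
  | f + 1, node :: qu, chains =>
      let chain := pvInnerA edges (edges.length + 2) [node]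
        ((PySem.Dict.getD (PySem.Dict.mk edges) node []).filter pvIsMulti)
      pvOuterA edges f (chain.foldl pvRemoveIf qu) (chains ++ [chain])

def get_multi_chains (line_nodes : List String) (edges_out : List (String × List String)) : List (List String) :=
  let multi_nodes := line_nodes.filter pvIsMulti
  pvOuterA edges_out multi_nodes.length multi_nodes []

-- ===== PORT B =====
-- 'multi' in n (B's test)
def pvIsMultiB (n : String) : Bool := PySem.Str.isIn "multi" n

-- the 'while True' chain walk of B, fueled (Pre_ guarantees the fuel is never exhausted)
def pvWalkB (edges : List (String × List String)) :
    Nat → List String → String → List String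
  | 0, chain, _ => chain
  | f + 1, chain, cur =>
      match (PySem.Dict.getD (PySem.Dict.mk edges) cur []).filter pvIsMultiB with
      | [] => chain
      | m :: _ => pvWalkB edges f (chain ++ [m]) m

-- body of B's 'for n in line_nodes' loop; state = (skip counter, chains)
def pvStepB (edges : List (String × List String))
    (st : PySem.Dict String Int × List (List String)) (n : String) :
    PySem.Dict String Int × List (List String) :=
  if pvIsMultiB n then
    let c := st.1.getD n 0
    if 0 < c then (st.1.insert n (c - 1), st.2)
    else
      let chain := pvWalkB edges (edges.length + 2) [n] n
      (chain.foldl (fun d m => d.insert m (d.getD m 0 + 1)) st.1, st.2 ++ [chain])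
  else st

def get_multi_chains_alt (line_nodes : List String) (edges_out : List (String × List String)) : List (List String) :=
  (line_nodes.foldl (pvStepB edges_out) (PySem.Dict.empty, [])).2

-- ===== PRECONDITION & SPEC =====
-- one step of the multi-successor walk (none = no key / no multi out-neighbour)
def pvSuccStep (edges : List (String × List String)) : Option String → Option String
  | none => none
  | some k => ((PySem.Dict.getD (PySem.Dict.mk edges) k []).filter pvIsMulti).head?

-- Pre_ excludes exactly the inputs on which Python A raises or loops forever: along the
-- multi-successor walk from some multi line node, a visited node missing from edges_out
-- (KeyError) or with two multi out-neighbours (A's assert), or a walk that never ends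
-- (a multi-successor cycle).
def Pre_get_multi_chains (line_nodes : List String) (edges_out : List (String × List String)) : Prop :=
  (∀ n ∈ line_nodes, pvIsMulti n = true →
      ∀ j < edges_out.length + 2, ∀ k, (pvSuccStep edges_out)^[j] (some n) = some k →
        (PySem.Dict.mk edges_out).contains k = true ∧
        ((PySem.Dict.getD (PySem.Dict.mk edges_out) k []).filter pvIsMulti).length ≤ 1) ∧
  (∀ n ∈ line_nodes, pvIsMulti n = true →
      (pvSuccStep edges_out)^[edges_out.length + 2] (some n) = none)
instance (line_nodes : List String) (edges_out : List (String × List String)) : Decidable (Pre_get_multi_chains line_nodes edges_out) := by unfold Pre_get_multi_chains; infer_instance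

def pvWitness_get_multi_chains : List String × (List (String × List String)) :=
  (["multi1", "a", "multi2"], [("multi1", ["a", "multi2"]), ("multi2", ["a"]), ("a", [])])

def Spec_get_multi_chains (line_nodes : List String) (edges_out : List (String × List String)) (out : List (List String)) : Prop := out = get_multi_chains_alt line_nodes edges_out
instance (line_nodes : List String) (edges_out : List (String × List String)) (out : List (List String)) : Decidable (Spec_get_multi_chains line_nodes edges_out out) := by unfold Spec_get_multi_chains; infer_instance

-- ===== CLAIM (what is proved, stated in full; the proofs are below) =====
def Claim_equal_get_multi_chains : Prop := ∀ (line_nodes : List String) (edges_out : List (String × List String)), Dom_get_multi_chains line_nodes edges_out → Pre_get_multi_chains line_nodes edges_out → Spec_get_multi_chains line_nodes edges_out (get_multi_chains line_nodes edges_out)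

-- ===== LEMMAS AND PROOFS =====

theorem pvIsMultiB_eq : pvIsMultiB = pvIsMulti := rfl


-- A's inner queue loop follows the unique multi successor, i.e. computes B's walk
theorem inner_eq_walk (eo : List (String × List String)) :
    ∀ (F : Nat) (chain : List String) (cur : String),
      (∀ (j : Nat) (k : String), (pvSuccStep eo)^[j] (some cur) = some k →
          ((PySem.Dict.getD (PySem.Dict.mk eo) k []).filter pvIsMulti).length ≤ 1) →
      pvInnerA eo F chain ((PySem.Dict.getD (PySem.Dict.mk eo) cur []).filter pvIsMulti)
        = pvWalkB eo F chain cur := by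
  intro F
  induction F with
  | zero =>
      intro chain cur _
      cases hm : (PySem.Dict.getD (PySem.Dict.mk eo) cur []).filter pvIsMulti with
      | nil => simp [pvInnerA, pvWalkB]
      | cons m t => simp [pvInnerA, pvWalkB]
  | succ f ih =>
      intro chain cur hwalk
      have hle := hwalk 0 cur rfl
      cases hm : (PySem.Dict.getD (PySem.Dict.mk eo) cur []).filter pvIsMulti with
      | nil => simp [pvInnerA, pvWalkB, pvIsMultiB_eq, hm]
      | cons m t =>
          rw [hm] at hle
          have ht : t = [] := by
            cases t with
            | nil => rfl
            | cons a b => simp at hle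
          subst ht
          have hstep : pvSuccStep eo (some cur) = some m := by
            simp [pvSuccStep, hm]
          have hwalk' : ∀ (j : Nat) (k : String), (pvSuccStep eo)^[j] (some m) = some k →
              ((PySem.Dict.getD (PySem.Dict.mk eo) k []).filter pvIsMulti).length ≤ 1 := by
            intro j k hj
            exact hwalk (j + 1) k (by rw [Function.iterate_succ_apply, hstep]; exact hj)
          show pvInnerA eo (f + 1) chain [m] = pvWalkB eo (f + 1) chain cur
          rw [show pvInnerA eo (f + 1) chain [m]
              = pvInnerA eo f (chain ++ [m])
                  ([] ++ (PySem.Dict.getD (PySem.Dict.mk eo) m []).filter pvIsMulti) from rfl]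
          rw [List.nil_append, ih (chain ++ [m]) m hwalk']
          simp [pvWalkB, pvIsMultiB_eq, hm]

-- skip-counter machinery: pvErase c xs drops, per node y, the first (c y) occurrences of y
def pvInc (c : String → Int) (m : String) : String → Int :=
  fun y => if y = m then c y + 1 else c y

def pvErase (c : String → Int) : List String → List String
  | [] => []
  | x :: xs =>
      if 0 < c x then pvErase (fun y => if y = x then c y - 1 else c y) xs
      else x :: pvErase c xs

theorem pvRemoveIf_nil (m : String) : pvRemoveIf [] m = [] := by
  simp [pvRemoveIf]

theorem pvRemoveIf_cons_self (t : List String) (m : String) :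
    pvRemoveIf (m :: t) m = t := by
  simp [pvRemoveIf, PySem.List.remove?_cons_self]

theorem pvRemoveIf_cons_ne (x : String) (t : List String) (m : String) (h : x ≠ m) :
    pvRemoveIf (x :: t) m = x :: pvRemoveIf t m := by
  unfold pvRemoveIf
  by_cases hc : t.contains m
  · have hm : m ∈ t := by simpa using hc
    have hx : (x :: t).contains m = true := by simp [hm]
    rw [hx, PySem.List.remove?_cons_of_ne t h, PySem.List.remove?_eq_some_erase t m hm]
    simp
  · have hm : m ∉ t := by simpa using hc
    have hx : (x :: t).contains m = false := by
      simp [hm]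
      exact fun he => absurd he.symm h
    rw [hx]
    simp [hm]

-- removing one (present) occurrence from an erased list = one more skip credit
theorem removeIf_erase (xs : List String) :
    ∀ (c : String → Int), (∀ y, 0 ≤ c y) → ∀ m,
      pvRemoveIf (pvErase c xs) m = pvErase (pvInc c m) xs := by
  induction xs with
  | nil => intro c hc m; simp [pvErase, pvRemoveIf_nil]
  | cons x xs ih =>
      intro c hc m
      by_cases h : 0 < c x
      · have h2 : 0 < pvInc c m x := by
          unfold pvInc; split <;> [skip; skip] <;> omega
        simp only [pvErase, if_pos h, if_pos h2]
        rw [ih _ (fun y => by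
          by_cases hy : y = x
          · subst hy; simp only [if_pos]; omega
          · simp only [if_neg hy]; exact hc y) m]
        congr 1
        funext y
        simp only [pvInc]
        split_ifs <;> omega
      · have hx0 : c x = 0 := le_antisymm (not_lt.mp h) (hc x)
        by_cases hxm : x = m
        · subst hxm
          have h2 : 0 < pvInc c x x := by simp [pvInc]; omega
          simp only [pvErase, if_neg h, if_pos h2]
          rw [pvRemoveIf_cons_self]
          congr 1
          funext y
          by_cases hy : y = x <;> simp [pvInc, hy]
        · have h2 : ¬ 0 < pvInc c m x := by
            have : pvInc c m x = c x := by simp [pvInc, hxm]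
            omega
          simp only [pvErase, if_neg h, if_neg h2]
          rw [pvRemoveIf_cons_ne _ _ _ hxm, ih c hc m]

theorem pvInc_nonneg (c : String → Int) (m : String) (hc : ∀ y, 0 ≤ c y) :
    ∀ y, 0 ≤ pvInc c m y := by
  intro y; unfold pvInc; split <;> [skip; skip] <;> [exact le_trans (hc y) (by omega); exact hc y]

theorem foldl_inc_nonneg (chain : List String) :
    ∀ (c : String → Int), (∀ y, 0 ≤ c y) → ∀ y, 0 ≤ chain.foldl pvInc c y := by
  induction chain with
  | nil => intro c hc y; exact hc y
  | cons m t ih => intro c hc y; exact ih (pvInc c m) (pvInc_nonneg c m hc) y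

-- A's chain-removal pass over an erased queue = adding one skip credit per chain node
theorem foldl_removeIf_erase (chain : List String) :
    ∀ (xs : List String) (c : String → Int), (∀ y, 0 ≤ c y) →
      chain.foldl pvRemoveIf (pvErase c xs) = pvErase (chain.foldl pvInc c) xs := by
  induction chain with
  | nil => intro xs c hc; rfl
  | cons m t ih =>
      intro xs c hc
      show t.foldl pvRemoveIf (pvRemoveIf (pvErase c xs) m)
          = pvErase ((m :: t).foldl pvInc c) xs
      rw [removeIf_erase xs c hc m]
      exact ih xs (pvInc c m) (pvInc_nonneg c m hc)

-- B's counter dict, read as a function, is the functional skip counter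
theorem cnt_foldl_insert (chain : List String) :
    ∀ (d : PySem.Dict String Int),
      (fun y => (chain.foldl (fun d m => d.insert m (d.getD m 0 + 1)) d).getD y 0)
        = chain.foldl pvInc (fun y => d.getD y 0) := by
  induction chain with
  | nil => intro d; rfl
  | cons m t ih =>
      intro d
      show (fun y => (t.foldl (fun d m => d.insert m (d.getD m 0 + 1))
              (d.insert m (d.getD m 0 + 1))).getD y 0)
          = t.foldl pvInc (pvInc (fun y => d.getD y 0) m)
      rw [ih (d.insert m (d.getD m 0 + 1))]
      congr 1
      funext y
      rw [PySem.Dict.getD_insert]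
      by_cases hy : y = m <;> simp [pvInc, hy]

theorem pvErase_zero : ∀ (xs : List String) (c : String → Int), (∀ y, c y = 0) →
    pvErase c xs = xs := by
  intro xs
  induction xs with
  | nil => intro c hc; rfl
  | cons x t ih =>
      intro c hc
      have : ¬ 0 < c x := by rw [hc x]; omega
      simp only [pvErase, if_neg this]
      rw [ih c hc]

-- B's fold skips non-multi nodes
theorem stepB_skip (eo : List (String × List String)) :
    ∀ (ln : List String) (st : PySem.Dict String Int × List (List String)),
      ln.foldl (pvStepB eo) st = (ln.filter pvIsMulti).foldl (pvStepB eo) st := by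
  intro ln
  induction ln with
  | nil => intro st; rfl
  | cons n t ih =>
      intro st
      by_cases hm : pvIsMulti n
      · simp only [List.foldl_cons, List.filter_cons, hm, if_pos]
        exact ih (pvStepB eo st n)
      · have : pvStepB eo st n = st := by simp [pvStepB, pvIsMultiB_eq, hm]
        simp only [List.foldl_cons, List.filter_cons, hm, this]
        exact ih st

-- main invariant: A's remaining queue is the erased remainder of the multi-node list
theorem outer_eq (eo : List (String × List String)) :
    ∀ (rest : List String) (fuel : Nat) (d : PySem.Dict String Int)
      (chains : List (List String)),
      rest.length ≤ fuel →
      (∀ y, 0 ≤ d.getD y 0) →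
      (∀ n ∈ rest, pvIsMulti n = true) →
      (∀ n ∈ rest, ∀ (j : Nat) (k : String), (pvSuccStep eo)^[j] (some n) = some k →
          ((PySem.Dict.getD (PySem.Dict.mk eo) k []).filter pvIsMulti).length ≤ 1) →
      pvOuterA eo fuel (pvErase (fun y => d.getD y 0) rest) chains
        = (rest.foldl (pvStepB eo) (d, chains)).2 := by
  intro rest
  induction rest with
  | nil =>
      intro fuel d chains _ _ _ _
      show pvOuterA eo fuel [] chains = chains
      cases fuel <;> rfl
  | cons n rest ih =>
      intro fuel d chains hf hnn hall hwalks
      have hmn : pvIsMulti n = true := hall n List.mem_cons_self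
      by_cases h : 0 < d.getD n 0
      · -- skipped occurrence: counter decremented on both sides
        simp only [pvErase, if_pos h]
        have hfun : (fun y => if y = n then d.getD y 0 - 1 else d.getD y 0)
            = (fun y => (d.insert n (d.getD n 0 - 1)).getD y 0) := by
          funext y
          rw [PySem.Dict.getD_insert]
          by_cases hy : y = n <;> simp [hy]
        rw [hfun, ih fuel (d.insert n (d.getD n 0 - 1)) chains
              (by simp at hf; omega)
              (by intro y; rw [PySem.Dict.getD_insert]
                  by_cases hy : y = n <;> simp [hy] <;> [omega; exact hnn y])
              (fun x hx => hall x (List.mem_cons_of_mem _ hx))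
              (fun x hx => hwalks x (List.mem_cons_of_mem _ hx))]
        simp only [List.foldl_cons]
        congr 2
        simp [pvStepB, pvIsMultiB_eq, hmn, h]
      · have h0 : d.getD n 0 = 0 := le_antisymm (not_lt.mp h) (hnn n)
        obtain ⟨f, rfl⟩ : ∃ f, fuel = f + 1 := ⟨fuel - 1, by simp at hf; omega⟩
        simp only [pvErase, if_neg h]
        show pvOuterA eo f
            ((pvInnerA eo (eo.length + 2) [n]
                ((PySem.Dict.getD (PySem.Dict.mk eo) n []).filter pvIsMulti)).foldl
              pvRemoveIf (pvErase (fun y => d.getD y 0) rest))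
            (chains ++ [pvInnerA eo (eo.length + 2) [n]
                ((PySem.Dict.getD (PySem.Dict.mk eo) n []).filter pvIsMulti)])
          = ((n :: rest).foldl (pvStepB eo) (d, chains)).2
        rw [inner_eq_walk eo (eo.length + 2) [n] n (hwalks n List.mem_cons_self)]
        set ch := pvWalkB eo (eo.length + 2) [n] n with hch
        rw [foldl_removeIf_erase ch rest (fun y => d.getD y 0) hnn,
            ← cnt_foldl_insert ch d,
            ih f (ch.foldl (fun d m => d.insert m (d.getD m 0 + 1)) d) (chains ++ [ch])
              (by simp at hf; omega)
              (fun y => le_of_le_of_eq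
                (foldl_inc_nonneg ch (fun y => d.getD y 0) hnn y)
                (congrFun (cnt_foldl_insert ch d) y).symm)
              (fun x hx => hall x (List.mem_cons_of_mem _ hx))
              (fun x hx => hwalks x (List.mem_cons_of_mem _ hx))]
        simp only [List.foldl_cons]
        congr 2
        simp [pvStepB, pvIsMultiB_eq, hmn, h0, hch]

-- ===== VERDICT (by name: the statement is the Claim_ definition above) =====
theorem get_multi_chains_spec : Claim_equal_get_multi_chains := by
  intro ln eo _ hpre
  obtain ⟨hvis, hterm⟩ := hpre
  unfold Spec_get_multi_chains get_multi_chains get_multi_chains_alt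
  rw [stepB_skip eo ln (PySem.Dict.empty, [])]
  have hz : pvErase (fun y => (PySem.Dict.empty : PySem.Dict String Int).getD y 0)
      (ln.filter pvIsMulti) = ln.filter pvIsMulti :=
    pvErase_zero _ _ (fun y => by simp [PySem.Dict.getD_empty])
  rw [← outer_eq eo (ln.filter pvIsMulti) (ln.filter pvIsMulti).length
        PySem.Dict.empty [] le_rfl
        (fun y => by simp [PySem.Dict.getD_empty])
        (fun n hn => (List.mem_filter.mp hn).2)
        (by
          intro n hn j k hjk
          have hmem := List.mem_filter.mp hn
          by_cases hj : j < eo.length + 2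
          · exact (hvis n hmem.1 hmem.2 j hj k hjk).2
          · exfalso
            have hnone : (pvSuccStep eo)^[j] (some n) = none := by
              have := hterm n hmem.1 hmem.2
              obtain ⟨i, rfl⟩ : ∃ i, j = i + (eo.length + 2) := ⟨j - (eo.length + 2), by omega⟩
              rw [Function.iterate_add_apply, this]
              exact Function.iterate_fixed rfl i
            rw [hnone] at hjk
            exact absurd hjk (by simp)), hz]
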